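-- pv_equiv track=rewrite | github.com/andy5090/central-mcp | src/central_mcp/grid.py | row_sizes
-- ===== SOURCE A (Python) =====
-- def row_sizes(n_panes: int, rows: int) -> list[int]:
--     """Distribute `n_panes` across `rows` rows, top-row-heavy when the
--     count doesn't divide evenly. Each entry is that row's column count.
--     """
--     if rows <= 0:
--         raise ValueError(f"rows must be >= 1, got {rows}")
--     if n_panes <= 0:
--         return []
--     remaining = n_panes
--     out: list[int] = []
--     for r_idx in range(rows):
--         rows_left = rows - r_idx
--         take = (remaining + rows_left - 1) // rows_left  # ceil(remaining / rows_left)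
--         out.append(take)
--         remaining -= take
--         if remaining <= 0:
--             break
--     return out
-- ===== SOURCE B (Python) =====
-- def row_sizes(n_panes: int, rows: int) -> list[int]:
--     if rows <= 0:
--         raise ValueError(f"rows must be >= 1, got {rows}")
--     if n_panes <= 0:
--         return []
--     base, extra = divmod(n_panes, rows)
--     out: list[int] = []
--     for i in range(rows):
--         size = base + (1 if i < extra else 0)
--         if size == 0:
--             break
--         out.append(size)
--     return out
-- ===== Notes on version B (the rewrite author's own statement) =====
-- stated objective: simpler
-- what changed: Replaces the running-remainder per-row ceiling division with a single divmod: each row's size is base plus one for the first 'extra' rows, breaking when a size would be zero.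
import Mathlib
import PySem

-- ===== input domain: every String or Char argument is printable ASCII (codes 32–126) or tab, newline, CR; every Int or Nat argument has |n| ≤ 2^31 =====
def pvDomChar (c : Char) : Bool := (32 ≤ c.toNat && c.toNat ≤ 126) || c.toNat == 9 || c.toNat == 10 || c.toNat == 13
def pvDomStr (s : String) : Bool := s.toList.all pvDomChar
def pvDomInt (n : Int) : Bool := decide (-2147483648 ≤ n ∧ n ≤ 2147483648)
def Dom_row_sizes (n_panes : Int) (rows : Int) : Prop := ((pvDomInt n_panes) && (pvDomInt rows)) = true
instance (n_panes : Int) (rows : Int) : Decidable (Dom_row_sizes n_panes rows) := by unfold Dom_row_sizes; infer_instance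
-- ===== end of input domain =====

-- B replaces A's running-remainder per-row ceiling division with one divmod and an
-- index comparison (simpler); A raises ValueError for rows <= 0, excluded by Pre_.


-- ===== PORT A =====
-- A's for-loop over range(rows) with state `remaining`, early break when it hits 0;
-- fuel counts the iterations left (rows.toNat - r_idx).
def rowLoopA (remaining : Int) (rows : Int) (r_idx : Nat) : Nat → List Int
  | 0 => []
  | fuel + 1 =>
    let rows_left := rows - (r_idx : Int)
    let take := PySem.Int.floordiv (remaining + rows_left - 1) rows_left
    if remaining - take ≤ 0 then [take]
    else take :: rowLoopA (remaining - take) rows (r_idx + 1) fuel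

def row_sizes (n_panes : Int) (rows : Int) : List Int :=
  -- rows ≤ 0 raises ValueError in Python: excluded by Pre_row_sizes
  if n_panes ≤ 0 then []
  else rowLoopA n_panes rows 0 rows.toNat

-- ===== PORT B =====
-- B's loop: size = base + (1 if i < extra else 0), break when size = 0.
def rowLoopB (base extra : Int) (i : Nat) : Nat → List Int
  | 0 => []
  | fuel + 1 =>
    let size := base + (if (i : Int) < extra then 1 else 0)
    if size = 0 then []
    else size :: rowLoopB base extra (i + 1) fuel

def row_sizes_alt (n_panes : Int) (rows : Int) : List Int :=
  -- rows ≤ 0 raises ValueError in Python: excluded by Pre_row_sizes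
  if n_panes ≤ 0 then []
  else rowLoopB (PySem.Int.floordiv n_panes rows) (PySem.Int.mod n_panes rows) 0 rows.toNat

-- ===== PRECONDITION & SPEC =====
-- Pre_ excludes rows ≤ 0, on which both A and B raise ValueError.
def Pre_row_sizes (n_panes : Int) (rows : Int) : Prop := 1 ≤ rows
instance (n_panes : Int) (rows : Int) : Decidable (Pre_row_sizes n_panes rows) := by
  unfold Pre_row_sizes; infer_instance
def pvWitness_row_sizes : Int × Int := (7, 3)

def Spec_row_sizes (n_panes : Int) (rows : Int) (out : List Int) : Prop := out = row_sizes_alt n_panes rows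
instance (n_panes : Int) (rows : Int) (out : List Int) : Decidable (Spec_row_sizes n_panes rows out) := by unfold Spec_row_sizes; infer_instance

-- ===== CLAIM (what is proved, stated in full; the proofs are below) =====
def Claim_equal_row_sizes : Prop := ∀ (n_panes : Int) (rows : Int), Dom_row_sizes n_panes rows → Pre_row_sizes n_panes rows → Spec_row_sizes n_panes rows (row_sizes n_panes rows)

-- ===== LEMMAS AND PROOFS =====

-- ceil division: (a + d - 1) // d = q when q*d - d < a ≤ q*d, for d > 0
lemma ceil_floordiv (a d q : Int) (hd : 0 < d) (h1 : q * d - d < a) (h2 : a ≤ q * d) :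
    PySem.Int.floordiv (a + d - 1) d = q := by
  rw [PySem.Int.floordiv_eq_iff_of_pos hd]
  constructor <;> nlinarith

-- loop invariant: with remaining = base*(rows - i) + leftover extras, A's loop equals B's
lemma loop_eq (fuel : Nat) : ∀ (i : Nat) (base extra rows : Int),
    0 ≤ base → 0 ≤ extra → extra < rows → (i : Int) < rows → fuel + i = rows.toNat →
    0 < base * (rows - i) + (if (i : Int) < extra then extra - i else 0) →
    rowLoopA (base * (rows - i) + (if (i : Int) < extra then extra - i else 0)) rows i fuel
      = rowLoopB base extra i fuel := by
  induction fuel with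
  | zero =>
    intro i base extra rows _ _ _ hi hfuel _
    omega
  | succ fuel ih =>
    intro i base extra rows hb he her hi hfuel hR
    set e : Int := if (i : Int) < extra then extra - i else 0 with he_def
    have he0 : 0 ≤ e := by rw [he_def]; split <;> omega
    have helt : e < rows - i := by rw [he_def]; split <;> omega
    have hrl : (0:Int) < rows - i := by omega
    set R : Int := base * (rows - i) + e with hR_def
    -- size/take value for this row
    set s : Int := base + (if (i : Int) < extra then 1 else 0) with hs_def
    have htake : PySem.Int.floordiv (R + (rows - i) - 1) (rows - i) = s := by
      apply ceil_floordiv _ _ _ hrl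
      · rw [hR_def, hs_def, he_def]; split <;> nlinarith
      · rw [hR_def, hs_def, he_def]; split <;> nlinarith
    have hs0 : s ≠ 0 := by
      rw [hs_def]
      split <;> [omega; skip]
      intro h
      rw [hR_def, he_def] at hR
      simp only [if_neg (by omega : ¬ (i : Int) < extra)] at hR
      nlinarith
    -- next remaining equals the invariant at i+1
    have hnext : R - s = base * (rows - (↑(i+1):Int)) + (if (↑(i+1):Int) < extra then extra - (↑(i+1):Int) else 0) := by
      rw [hR_def, hs_def, he_def]
      push_cast
      by_cases h1 : (i : Int) < extra
      · by_cases h2 : (i : Int) + 1 < extra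
        · simp [h1, h2]; ring
        · simp [h1, h2]
          have : extra = (i : Int) + 1 := by omega
          rw [this]; ring
      · have h2 : ¬ ((i : Int) + 1 < extra) := by omega
        simp [h1, h2]; ring
    rw [rowLoopA, rowLoopB]
    simp only [htake, ← hs_def, if_neg hs0]
    by_cases hlast : fuel = 0
    · -- last iteration: A returns [s] whether it breaks or not; B's tail is []
      subst hlast
      rw [rowLoopB]
      split <;> rfl
    · have hi1 : ((i + 1 : Nat) : Int) < rows := by push_cast; omega
      by_cases hbreak : R - s ≤ 0
      · -- A breaks; B's next size is 0
        rw [if_pos hbreak]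
        have hz : base = 0 ∧ ¬ ((↑(i+1):Int) < extra) := by
          rw [hnext] at hbreak
          have hpos : (0:Int) < rows - (↑(i+1):Int) := by push_cast at hi1 ⊢; omega
          by_cases h : (↑(i+1):Int) < extra
          · exfalso
            simp only [if_pos h] at hbreak
            nlinarith [mul_nonneg hb (le_of_lt hpos)]
          · simp only [if_neg h] at hbreak
            refine ⟨?_, h⟩
            by_contra hbz
            have : 0 < base := lt_of_le_of_ne hb (Ne.symm hbz)
            nlinarith
        obtain ⟨fuel', rfl⟩ : ∃ k, fuel = k + 1 := ⟨fuel - 1, by omega⟩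
        have hBnil : rowLoopB base extra (i + 1) (fuel' + 1) = [] := by
          rw [rowLoopB]
          simp [hz.1]
          omega
        rw [hBnil]
      · -- both continue
        rw [if_neg hbreak]
        have hR' : 0 < base * (rows - (↑(i+1):Int)) + (if (↑(i+1):Int) < extra then extra - (↑(i+1):Int) else 0) := by
          rw [← hnext]; omega
        have := ih (i+1) base extra rows hb he her hi1 (by omega) hR'
        rw [hnext, this]

theorem row_sizes_spec : Claim_equal_row_sizes := by
  intro n rows _ hpre
  unfold Spec_row_sizes row_sizes row_sizes_alt
  by_cases hn : n ≤ 0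
  · simp [hn]
  · rw [if_neg hn, if_neg hn]
    have hrows : (0:Int) < rows := hpre
    set base := PySem.Int.floordiv n rows with hbase
    set extra := PySem.Int.mod n rows with hextra
    have hsum : base * rows + extra = n := PySem.Int.floordiv_mul_add_mod n rows
    have he0 : 0 ≤ extra := PySem.Int.mod_nonneg n hrows
    have helt : extra < rows := PySem.Int.mod_lt n hrows
    have hb0 : 0 ≤ base := by nlinarith
    have h := loop_eq rows.toNat 0 base extra rows hb0 he0 helt (by push_cast; omega) (by omega)
    simp only [Nat.cast_zero, sub_zero] at h
    have hRn : base * rows + (if (0:Int) < extra then extra else 0) = n := by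
      split <;> omega
    rw [hRn] at h
    exact h (by omega)
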